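-- pv_equiv track=rewrite | github.com/pypi-data/pypi-mirror-359 | packages/streamfeed-parser/streamfeed_parser-0.2.8.tar.gz/streamfeed_parser-0.2.8/streamfeed/csv_parser.py | join_broken_csv_lines
-- ===== SOURCE A (Python) =====
-- from typing import Optional, Dict, Any, Iterator, List, Union, Tuple
--
-- def join_broken_csv_lines(lines_gen: Iterator[str]) -> Iterator[str]:
--     """
--     Process an iterator of lines and join those that are part of the same CSV record
--     due to newlines inside quoted fields.
--     """
--     buffer = ""
--     quote_count = 0
--     in_quote = False
--
--     for line in lines_gen:
--         if not buffer:
--             buffer = line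
--             # Count quotes in the first line
--             quote_count = buffer.count('"')
--             in_quote = (
--                 quote_count % 2 == 1
--             )  # Odd number of quotes means we're inside a quoted field
--             if not in_quote:
--                 yield buffer
--                 buffer = ""
--             continue
--
--         # We have content in the buffer, meaning we're inside a quoted field
--         buffer += "\n" + line
--         quote_count += line.count('"')
--         in_quote = quote_count % 2 == 1
--
--         if not in_quote:  # If we're not in a quote anymore, yield the complete record
--             yield buffer
--             buffer = ""
--
--     # Don't forget any remaining content
--     if buffer:
--         yield buffer
-- ===== SOURCE B (Python) =====
-- def join_broken_csv_lines(lines_gen):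
--     """
--     Join CSV lines split by newlines inside quoted fields.
--
--     Different strategy: flatten the lines into one token stream (each character
--     is a token, each line boundary the token None), then run a single
--     character-level scanner over it: quotes toggle state, a boundary token ends
--     the record when outside quotes and becomes '\n' inside quotes.
--     """
--     lines = list(lines_gen)
--     if not lines:
--         return
--     tokens = []
--     for line in lines:
--         tokens.extend(line)
--         tokens.append(None)
--     tokens.pop()  # no boundary after the last line
--     cur = []
--     in_q = False
--     for tok in tokens:
--         if tok == '"':
--             in_q = not in_q
--             cur.append(tok)
--         elif tok is None:
--             if in_q:
--                 cur.append('\n')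
--             else:
--                 yield "".join(cur)
--                 cur = []
--         else:
--             cur.append(tok)
--     yield "".join(cur)
-- ===== Notes on version B (the rewrite author's own statement) =====
-- stated objective: alternative
-- what changed: Replaces A's per-line buffer/quote_count/in_quote state machine by a two-stage pipeline: flatten all lines into one token stream (characters plus None boundary tokens), then run a single character-level scanner that toggles on quotes and, at a boundary token, either closes the record (outside quotes) or emits a '\n' (inside quotes).
import Mathlib
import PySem

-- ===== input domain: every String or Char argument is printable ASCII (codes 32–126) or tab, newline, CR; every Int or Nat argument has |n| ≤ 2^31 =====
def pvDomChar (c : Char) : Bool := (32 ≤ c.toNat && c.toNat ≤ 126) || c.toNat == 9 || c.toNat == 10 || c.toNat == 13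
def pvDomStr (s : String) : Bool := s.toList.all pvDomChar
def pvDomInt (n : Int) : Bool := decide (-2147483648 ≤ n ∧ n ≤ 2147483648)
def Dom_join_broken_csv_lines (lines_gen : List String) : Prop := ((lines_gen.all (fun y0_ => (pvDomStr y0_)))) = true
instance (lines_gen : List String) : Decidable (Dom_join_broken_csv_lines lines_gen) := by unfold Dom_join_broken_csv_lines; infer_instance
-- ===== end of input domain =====

-- B flattens the lines into one token stream (chars + None boundary tokens) and runs a single
-- character-level quote-aware scanner over it, instead of A's per-line buffer/quote_count/in_quote
-- state machine (objective: alternative).  Neither version mutates its input.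


-- ===== PORT A =====
-- state: (yielded list, buffer, quote_count, in_quote)
def pvStepA (s : List String × String × Int × Bool) (line : String) :
    List String × String × Int × Bool :=
  match s with
  | (out, buffer, qc, _inq) =>
    if buffer = "" then
      let buffer := line
      let qc : Int := (PySem.Str.count buffer "\"" : Int)
      let inq := PySem.Int.mod qc 2 == 1
      if !inq then (out ++ [buffer], "", qc, inq) else (out, buffer, qc, inq)
    else
      let buffer := buffer ++ "\n" ++ line
      let qc := qc + (PySem.Str.count line "\"" : Int)
      let inq := PySem.Int.mod qc 2 == 1
      if !inq then (out ++ [buffer], "", qc, inq) else (out, buffer, qc, inq)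

def join_broken_csv_lines (lines_gen : List String) : List String :=
  let st := lines_gen.foldl pvStepA ([], "", 0, false)
  if st.2.1 ≠ "" then st.1 ++ [st.2.1] else st.1

-- ===== PORT B =====
-- one scanner step; token 'none' is a line boundary, 'some c' a character
-- state: (yielded list, cur : List Char, in_q)
def pvStepB (s : List String × List Char × Bool) (tok : Option Char) :
    List String × List Char × Bool :=
  match s with
  | (out, cur, inq) =>
    if tok = some '"' then (out, cur ++ ['"'], !inq)
    else
      match tok with
      | none => if inq then (out, cur ++ ['\n'], inq) else (out ++ [String.ofList cur], [], inq)
      | some c => (out, cur ++ [c], inq)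

def join_broken_csv_lines_alt (lines_gen : List String) : List String :=
  match lines_gen with
  | [] => []
  | _ =>
    -- tokens.extend(line); tokens.append(None) per line, then tokens.pop()
    let tokens := (lines_gen.flatMap (fun l => l.toList.map some ++ [none])).dropLast
    let st := tokens.foldl pvStepB ([], [], false)
    st.1 ++ [String.ofList st.2.1]

-- ===== PRECONDITION & SPEC =====
def Spec_join_broken_csv_lines (lines_gen : List String) (out : List String) : Prop := out = join_broken_csv_lines_alt lines_gen
instance (lines_gen : List String) (out : List String) : Decidable (Spec_join_broken_csv_lines lines_gen out) := by unfold Spec_join_broken_csv_lines; infer_instance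

-- ===== CLAIM (what is proved, stated in full; the proofs are below) =====
def Claim_equal_join_broken_csv_lines : Prop := ∀ (lines_gen : List String), Dom_join_broken_csv_lines lines_gen → Spec_join_broken_csv_lines lines_gen (join_broken_csv_lines lines_gen)

-- ===== LEMMAS AND PROOFS =====

-- PySem.Str.count with a one-character needle is List.count
theorem pv_count_go (fuel : Nat) : ∀ (l : List Char) (acc : Nat), l.length ≤ fuel →
    PySem.Chars.count.go ['"'] fuel l acc = acc + l.count '"' := by
  induction fuel with
  | zero => intro l acc h; rw [List.length_eq_zero_iff.mp (Nat.le_zero.mp h)]; simp [PySem.Chars.count.go]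
  | succ n ih =>
    intro l acc h
    cases l with
    | nil => simp [PySem.Chars.count.go]
    | cons c t =>
      rw [PySem.Chars.count.go]
      simp only [List.length_cons] at h
      by_cases hc : c = '"'
      · subst hc
        rw [show List.isPrefixOf ['"'] ('"'::t) = true by simp [List.isPrefixOf]]
        simp only [if_pos, List.length_singleton, List.drop_succ_cons, List.drop_zero]
        rw [ih t (acc+1) (by omega)]
        simp; omega
      · rw [show List.isPrefixOf ['"'] (c::t) = false by simp [List.isPrefixOf]; exact fun h => hc h.symm]
        simp only [Bool.false_eq_true, if_false]
        rw [ih t acc (by omega)]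
        simp [hc]

theorem pv_count_quote (s : String) : PySem.Str.count s "\"" = s.toList.count '"' := by
  have h : "\"".toList = ['"'] := rfl
  simp only [PySem.Str.count, PySem.Chars.count, h, List.isEmpty_cons, if_false, Bool.false_eq_true]
  simpa using pv_count_go s.toList.length s.toList 0 (le_refl _)

def pvParity (cs : List Char) : Bool := cs.count '"' % 2 == 1

theorem pv_mod_eq (a : Int) : PySem.Int.mod a 2 = a % 2 := by
  simp [PySem.Int.mod, Int.fmod_eq_emod]

theorem pv_mod_cast (c : Nat) : (PySem.Int.mod (c : Int) 2 == 1) = (c % 2 == 1) := by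
  rw [pv_mod_eq]
  rcases Nat.mod_two_eq_zero_or_one c with h | h <;>
    · have : ((c : Int)) % 2 = ((c % 2 : Nat) : Int) := by omega
      simp [this, h]

theorem pv_mod_add (qc : Int) (c : Nat) (h : (PySem.Int.mod qc 2 == 1) = true) :
    (PySem.Int.mod (qc + (c : Int)) 2 == 1) = (!(c % 2 == 1)) := by
  rw [pv_mod_eq] at h ⊢
  simp only [beq_iff_eq] at h
  rcases Nat.mod_two_eq_zero_or_one c with hc | hc <;> simp [hc] <;> omega

-- evaluation of one A-step
theorem pv_stepA_empty (out : List String) (qc : Int) (inq : Bool) (line : String) :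
    pvStepA (out, "", qc, inq) line =
      if pvParity line.toList
      then (out, line, (PySem.Str.count line "\"" : Int), true)
      else (out ++ [line], "", (PySem.Str.count line "\"" : Int), false) := by
  simp only [pvStepA, pv_mod_cast, pv_count_quote, pvParity]
  cases h : (line.toList.count '"' % 2 == 1) <;> simp

theorem pv_stepA_nonempty (out : List String) (buffer : String) (qc : Int) (inq : Bool)
    (line : String) (h : buffer ≠ "") :
    pvStepA (out, buffer, qc, inq) line =
      if PySem.Int.mod (qc + (PySem.Str.count line "\"" : Int)) 2 == 1
      then (out, buffer ++ "\n" ++ line, qc + (PySem.Str.count line "\"" : Int), true)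
      else (out ++ [buffer ++ "\n" ++ line], "", qc + (PySem.Str.count line "\"" : Int), false) := by
  simp only [pvStepA, if_neg h]
  cases hq : (PySem.Int.mod (qc + (PySem.Str.count line "\"" : Int)) 2 == 1) <;> simp

-- B's scan over the character tokens of one line
theorem pv_scan_block (cs : List Char) :
    ∀ (out : List String) (cur : List Char) (q : Bool),
    (cs.map some).foldl pvStepB (out, cur, q) = (out, cur ++ cs, xor q (pvParity cs)) := by
  induction cs with
  | nil => intro out cur q; simp [pvParity]
  | cons c t ih =>
    intro out cur q
    by_cases hc : c = '"'
    · subst hc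
      have hx : xor (!q) (pvParity t) = xor q (pvParity ('"' :: t)) := by
        simp only [pvParity, List.count_cons]
        rcases Nat.mod_two_eq_zero_or_one (t.count '"') with h2 | h2 <;>
          · have h3 : (t.count '"' + 1) % 2 = 1 - t.count '"' % 2 := by omega
            cases q <;> simp [h2, h3]
      rw [List.map_cons, List.foldl_cons,
        show pvStepB (out, cur, q) (some '"') = (out, cur ++ ['"'], !q) from by simp [pvStepB],
        ih, hx]
      simp
    · have hx : pvParity (c :: t) = pvParity t := by simp [pvParity, hc]
      rw [List.map_cons, List.foldl_cons,
        show pvStepB (out, cur, q) (some c) = (out, cur ++ [c], q) from by simp [pvStepB, hc],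
        ih, hx]
      simp

-- B-steps on a boundary token
theorem pv_stepB_none_out (out : List String) (cur : List Char) :
    pvStepB (out, cur, false) none = (out ++ [String.ofList cur], [], false) := by
  simp [pvStepB]

theorem pv_stepB_none_in (out : List String) (cur : List Char) :
    pvStepB (out, cur, true) none = (out, cur ++ ['\n'], true) := by
  simp [pvStepB]

-- the boundary-prefixed token stream of the remaining lines
def pvPref (ls : List String) : List (Option Char) :=
  ls.flatMap (fun s => none :: s.toList.map some)

theorem pv_pref_cons (l : String) (t : List String) :
    pvPref (l :: t) = none :: (l.toList.map some ++ pvPref t) := by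
  simp [pvPref]

theorem pv_tokens_eq (l : String) (t : List String) :
    ((l :: t).flatMap (fun s => s.toList.map some ++ [none])).dropLast =
      l.toList.map some ++ pvPref t := by
  induction t generalizing l with
  | nil => simp [pvPref]
  | cons b r ih =>
    have hne : ((b :: r).flatMap (fun s => s.toList.map some ++ [none])) ≠ [] := by
      simp [List.flatMap_cons]
    rw [List.flatMap_cons, List.dropLast_append_of_ne_nil hne, ih b, pv_pref_cons]
    simp

-- the invariant tying A's boundary state to B's (pending output, cur, parity) state
def pvInv (outA : List String) (buffer : String) (qc : Int)
    (out : List String) (cur : List Char) (q : Bool) : Prop :=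
  (buffer = "" ∧ q = false ∧ outA = out ++ [String.ofList cur]) ∨
  (buffer ≠ "" ∧ q = true ∧ (PySem.Int.mod qc 2 == 1) = true ∧ cur = buffer.toList ∧ outA = out)

def pvFinishA (st : List String × String × Int × Bool) : List String :=
  if st.2.1 ≠ "" then st.1 ++ [st.2.1] else st.1

def pvFinishB (st : List String × List Char × Bool) : List String :=
  st.1 ++ [String.ofList st.2.1]

theorem pv_parity_false_of_empty : pvParity "".toList = false := by decide

-- invariant transport: A folds over the remaining lines, B scans their boundary-prefixed tokens
theorem pv_transport (t : List String) :
    ∀ (outA : List String) (buffer : String) (qc : Int) (inq : Bool)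
      (out : List String) (cur : List Char) (q : Bool),
    pvInv outA buffer qc out cur q →
    pvFinishA (t.foldl pvStepA (outA, buffer, qc, inq)) =
      pvFinishB ((pvPref t).foldl pvStepB (out, cur, q)) := by
  induction t with
  | nil =>
    intro outA buffer qc inq out cur q hinv
    rcases hinv with ⟨hb, hq, ho⟩ | ⟨hb, hq, hqc, hcur, ho⟩
    · simp [pvPref, pvFinishA, pvFinishB, hb, ho]
    · simp [pvPref, pvFinishA, pvFinishB, hb, ho, hcur, String.ofList_toList]
  | cons l t ih =>
    intro outA buffer qc inq out cur q hinv
    rw [List.foldl_cons, pv_pref_cons, List.foldl_cons]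
    rcases hinv with ⟨hb, hq, ho⟩ | ⟨hb, hq, hqc, hcur, ho⟩
    · -- between records: B yields the pending record at this boundary
      subst hb hq
      rw [pv_stepB_none_out, List.foldl_append, pv_scan_block l.toList, pv_stepA_empty]
      by_cases hp : pvParity l.toList = true
      · rw [if_pos hp]
        apply ih
        refine Or.inr ⟨?_, by simp [hp], ?_, by simp, ho⟩
        · intro h0
          rw [h0] at hp
          rw [pv_parity_false_of_empty] at hp
          exact Bool.false_ne_true hp
        · show (PySem.Int.mod ((PySem.Str.count l "\"" : Nat) : Int) 2 == 1) = true
          rw [pv_mod_cast, pv_count_quote]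
          exact hp
      · rw [if_neg hp]
        apply ih
        have hp' : pvParity l.toList = false := by simpa using hp
        exact Or.inl ⟨rfl, by simp [hp'], by rw [ho]; simp⟩
    · -- inside a record: the boundary becomes '\n' and scanning continues
      subst hq hcur ho
      rw [pv_stepB_none_in, List.foldl_append, pv_scan_block l.toList,
        pv_stepA_nonempty _ _ _ _ _ hb, pv_mod_add qc _ hqc, pv_count_quote]
      by_cases hp : pvParity l.toList = true
      · -- parity flips to even: the record is complete, both sides yield it
        have hcnt : (l.toList.count '"' % 2 == 1) = true := hp
        rw [hcnt, if_neg (by simp)]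
        apply ih
        refine Or.inl ⟨rfl, by simp [hp], ?_⟩
        congr 2
        apply String.toList_inj.mp
        rw [String.toList_ofList]
        simp [show "\n".toList = ['\n'] from rfl]
      · -- still odd: keep accumulating
        have hcnt : (l.toList.count '"' % 2 == 1) = false := by simpa [pvParity] using hp
        have hpf : pvParity l.toList = false := by unfold pvParity; exact hcnt
        rw [hcnt, if_pos (by simp)]
        apply ih
        refine Or.inr ⟨?_, by simp [hpf], ?_, ?_, rfl⟩
        · intro h0
          have h1 := congrArg String.toList h0
          simp at h1
        · show (PySem.Int.mod (qc + ((l.toList.count '"' : Nat) : Int)) 2 == 1) = true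
          rw [pv_mod_add qc _ hqc, hcnt]
          rfl
        · simp

-- ===== VERDICT (by name: the statement is the Claim_ definition above) =====
theorem join_broken_csv_lines_spec : Claim_equal_join_broken_csv_lines := by
  intro lines _
  unfold Spec_join_broken_csv_lines
  cases lines with
  | nil => rfl
  | cons l t =>
    show join_broken_csv_lines (l :: t) =
      pvFinishB ((((l :: t).flatMap (fun s => s.toList.map some ++ [none])).dropLast).foldl
        pvStepB ([], [], false))
    unfold join_broken_csv_lines
    rw [pv_tokens_eq, List.foldl_append, pv_scan_block l.toList, List.foldl_cons, pv_stepA_empty]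
    simp only [Bool.false_xor, List.nil_append]
    have hfin : ∀ st, (if st.2.1 ≠ "" then st.1 ++ [st.2.1] else st.1) = pvFinishA st :=
      fun st => rfl
    by_cases hp : pvParity l.toList = true
    · rw [if_pos hp, hp, hfin]
      apply pv_transport t
      refine Or.inr ⟨?_, rfl, ?_, rfl, rfl⟩
      · intro h0
        rw [h0] at hp
        rw [pv_parity_false_of_empty] at hp
        exact Bool.false_ne_true hp
      · show (PySem.Int.mod ((PySem.Str.count l "\"" : Nat) : Int) 2 == 1) = true
        rw [pv_mod_cast, pv_count_quote]
        exact hp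
    · have hp' : pvParity l.toList = false := by simpa using hp
      rw [if_neg hp, hp', hfin]
      apply pv_transport t
      exact Or.inl ⟨rfl, rfl, by simp⟩
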